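-- pv_equiv track=rewrite | github.com/arkanwolfshade/MythosMUD | server/commands/admin_shutdown_command.py | calculate_notification_times
-- ===== SOURCE A (Python) =====
-- def calculate_notification_times(countdown_seconds: int) -> list[int]:
--     """
--     Calculate notification times for countdown.
--
--     Notifications occur:
--     - Every 10 seconds when countdown > 10 seconds
--     - Every second for final 10 seconds
--
--     Args:
--         countdown_seconds: Total countdown duration
--
--     Returns:
--         List of times (in seconds) when notifications should be sent, sorted descending
--     """
--     notification_times = set()
--
--     # Add final 10 seconds (or all seconds if countdown <= 10)
--     for i in range(1, min(11, countdown_seconds + 1)):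
--         notification_times.add(i)
--
--     # Add 10-second intervals for countdown > 10
--     if countdown_seconds > 10:
--         current = (countdown_seconds // 10) * 10  # Round down to nearest 10
--         while current >= 10:
--             notification_times.add(current)
--             current -= 10
--
--     # Return sorted in descending order
--     return sorted(notification_times, reverse=True)
-- ===== SOURCE B (Python) =====
-- def calculate_notification_times(countdown_seconds: int) -> list[int]:
--     """Descending notification times, built directly from arithmetic ranges (no set, no sort)."""
--     if countdown_seconds <= 10:
--         return list(range(countdown_seconds, 0, -1))
--     tens = list(range((countdown_seconds // 10) * 10, 0, -10))
--     ones = list(range(9, 0, -1))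
--     return tens + ones
-- ===== Notes on version B (the rewrite author's own statement) =====
-- stated objective: simpler
-- what changed: B builds the descending result directly from arithmetic ranges (tens range down to 10, then 9..1) instead of accumulating a set in a loop and sorting it.
import Mathlib
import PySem

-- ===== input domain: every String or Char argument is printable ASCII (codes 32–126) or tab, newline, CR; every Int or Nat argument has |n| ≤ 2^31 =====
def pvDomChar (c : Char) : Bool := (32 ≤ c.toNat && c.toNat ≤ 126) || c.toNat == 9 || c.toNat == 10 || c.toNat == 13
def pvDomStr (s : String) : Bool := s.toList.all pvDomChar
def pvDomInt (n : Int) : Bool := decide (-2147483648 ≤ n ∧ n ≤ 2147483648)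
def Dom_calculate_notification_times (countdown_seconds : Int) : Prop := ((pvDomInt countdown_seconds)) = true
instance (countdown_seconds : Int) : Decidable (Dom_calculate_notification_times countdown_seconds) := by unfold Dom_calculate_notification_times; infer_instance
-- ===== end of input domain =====

-- B builds the descending result directly from arithmetic ranges instead of filling a set and sorting it (objective: simpler).

-- ===== PORT A =====
-- the 'while current >= 10: add current; current -= 10' loop of A
def pvAddTens (current : Int) (s : PySem.Set Int) : PySem.Set Int :=
  if 10 ≤ current then pvAddTens (current - 10) (PySem.Set.add s current) else s
termination_by current.toNat
decreasing_by omega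

def calculate_notification_times (countdown_seconds : Int) : List Int :=
  let notification_times : PySem.Set Int :=
    (PySem.List.pyRange 1 (min 11 (countdown_seconds + 1)) 1).foldl PySem.Set.add PySem.Set.empty
  let notification_times :=
    if countdown_seconds > 10 then
      pvAddTens (PySem.Int.floordiv countdown_seconds 10 * 10) notification_times
    else notification_times
  PySem.List.sorted notification_times (fun x => x) true

-- ===== PORT B =====
def calculate_notification_times_alt (countdown_seconds : Int) : List Int :=
  if countdown_seconds ≤ 10 then
    PySem.List.pyRange countdown_seconds 0 (-1)
  else
    PySem.List.pyRange (PySem.Int.floordiv countdown_seconds 10 * 10) 0 (-10)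
      ++ PySem.List.pyRange 9 0 (-1)

-- ===== PRECONDITION & SPEC =====
def Spec_calculate_notification_times (countdown_seconds : Int) (out : List Int) : Prop := out = calculate_notification_times_alt countdown_seconds
instance (countdown_seconds : Int) (out : List Int) : Decidable (Spec_calculate_notification_times countdown_seconds out) := by unfold Spec_calculate_notification_times; infer_instance

-- ===== CLAIM (what is proved, stated in full; the proofs are below) =====
def Claim_equal_calculate_notification_times : Prop := ∀ (countdown_seconds : Int), Dom_calculate_notification_times countdown_seconds → Spec_calculate_notification_times countdown_seconds (calculate_notification_times countdown_seconds)

-- ===== LEMMAS AND PROOFS =====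

-- range(a, b, -10) unfolds one element at a time
theorem pvTens_cons (a b : Int) (h : b < a) :
    PySem.List.pyRange a b (-10) = a :: PySem.List.pyRange (a - 10) b (-10) := by
  rw [PySem.List.pyRange_of_neg a b (by omega), PySem.List.pyRange_of_neg (a - 10) b (by omega)]
  by_cases h2 : b < a - 10
  · have hc : (if b < a then ((a - b + - -10 - 1) / - -10).toNat else 0)
        = (if b < a - 10 then ((a - 10 - b + - -10 - 1) / - -10).toNat else 0) + 1 := by
      rw [if_pos h, if_pos h2]; norm_num; omega
    rw [hc, List.range_succ_eq_map, List.map_cons, List.map_map]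
    refine congrArg₂ _ (by ring) (List.map_congr_left fun k _ => ?_)
    simp only [Function.comp]; push_cast; ring
  · have hc : (if b < a then ((a - b + - -10 - 1) / - -10).toNat else 0) = 1 := by
      rw [if_pos h]; norm_num; omega
    rw [hc, if_neg h2]
    simp

theorem pvTens_nil (a b : Int) (h : a ≤ b) : PySem.List.pyRange a b (-10) = [] := by
  rw [PySem.List.pyRange_of_neg a b (by omega)]
  simp [show ¬ b < a by omega]

-- range(a, b, -10) is strictly decreasing
theorem pvTens_pairwise (a b : Int) :
    List.Pairwise (fun x y => y < x) (PySem.List.pyRange a b (-10)) := by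
  rw [PySem.List.pyRange_of_neg a b (by omega)]
  refine List.pairwise_map.mpr (List.pairwise_lt_range.imp ?_)
  intro k j hkj; omega

-- range(9, 0, -1) is strictly decreasing
theorem pvOnes_pairwise :
    List.Pairwise (fun x y => y < x) (PySem.List.pyRange 9 0 (-1)) := by
  rw [PySem.List.pyRange_neg_one_eq_reverse, List.pairwise_reverse]
  exact PySem.List.pairwise_lt_pyRange_one _ _

-- the while loop appends exactly range(current, 10, -10) to the set
theorem pvAddTens_eq (c : Int) (s : PySem.Set Int)
    (hnew : ∀ x ∈ PySem.List.pyRange c 10 (-10), x ∉ s) (h10 : (10:Int) ∈ s) :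
    pvAddTens c s = s ++ PySem.List.pyRange c 10 (-10) := by
  induction c, s using pvAddTens.induct with
  | case1 c s hge ih =>
    rw [pvAddTens, if_pos hge]
    by_cases hc : c = 10
    · subst hc
      have hadd : PySem.Set.add s 10 = s := PySem.Set.add_of_mem h10
      rw [ih (by rw [hadd, pvTens_nil (10 - 10) 10 (by omega)]; intro x hx; simp at hx)
            (by rw [hadd]; exact h10)]
      rw [hadd, pvTens_nil (10 - 10) 10 (by omega), pvTens_nil 10 10 (by omega)]
    · have hlt : 10 < c := lt_of_le_of_ne hge (Ne.symm hc)
      have hcm : c ∈ PySem.List.pyRange c 10 (-10) := by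
        rw [pvTens_cons c 10 hlt]; exact List.mem_cons_self
      have hcs : c ∉ s := hnew c hcm
      have hadd : PySem.Set.add s c = s ++ [c] := PySem.Set.add_of_not_mem hcs
      have hnew' : ∀ x ∈ PySem.List.pyRange (c - 10) 10 (-10), x ∉ PySem.Set.add s c := by
        intro x hx
        have hx' : x ∈ PySem.List.pyRange c 10 (-10) := by
          rw [pvTens_cons c 10 hlt]; exact List.mem_cons_of_mem _ hx
        have hxle : x ≤ c - 10 := ((PySem.List.mem_pyRange_iff_of_neg (by omega) x).mp hx).2.1
        rw [hadd]
        simp only [List.mem_append, List.mem_singleton]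
        rintro (h1 | h2)
        · exact hnew x hx' h1
        · omega
      have h10' : (10:Int) ∈ PySem.Set.add s c := by rw [hadd]; exact List.mem_append_left _ h10
      rw [ih hnew' h10', hadd, pvTens_cons c 10 hlt]
      simp
  | case2 c s hge =>
    rw [pvAddTens, if_neg hge, pvTens_nil c 10 (by omega)]
    simp

-- range(m, 0, -10) for a positive multiple of 10 ends with the element 10
theorem pvTens_split : ∀ (k : Nat) (m : Int), m = 10 * ((k : Int) + 1) →
    PySem.List.pyRange m 0 (-10) = PySem.List.pyRange m 10 (-10) ++ [10] := by
  intro k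
  induction k with
  | zero =>
    intro m hm
    norm_num at hm; subst hm
    rw [pvTens_cons 10 0 (by omega), pvTens_nil (10 - 10) 0 (by omega), pvTens_nil 10 10 (by omega)]
    simp
  | succ k ih =>
    intro m hm
    have h1 : (0:Int) < m := by push_cast at hm; omega
    have h2 : (10:Int) < m := by push_cast at hm; omega
    rw [pvTens_cons m 0 h1, pvTens_cons m 10 h2, ih (m - 10) (by push_cast at hm ⊢; omega)]
    simp

theorem calculate_notification_times_spec : Claim_equal_calculate_notification_times := by
  intro n _
  unfold Spec_calculate_notification_times
  simp only [calculate_notification_times, calculate_notification_times_alt]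
  rw [show (PySem.Set.empty : PySem.Set Int) = [] from rfl, ← PySem.Set.ofList_eq_foldl]
  by_cases h : n ≤ 10
  · rw [if_neg (by omega), if_pos h]
    have hmin : min 11 (n + 1) = n + 1 := by omega
    rw [hmin, PySem.Set.ofList_eq_self_of_nodup _ (PySem.List.nodup_pyRange_one _ _)]
    apply PySem.List.sorted_rev_eq_of_perm_of_pairwise_gt
    · rw [show PySem.List.pyRange n 0 (-1) = (PySem.List.pyRange 1 (n + 1) 1).reverse by
        simpa using PySem.List.pyRange_neg_one_eq_reverse n 0]
      exact (PySem.List.pyRange 1 (n + 1) 1).reverse_perm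
    · rw [show PySem.List.pyRange n 0 (-1) = (PySem.List.pyRange 1 (n + 1) 1).reverse by
        simpa using PySem.List.pyRange_neg_one_eq_reverse n 0]
      rw [List.pairwise_reverse]
      exact PySem.List.pairwise_lt_pyRange_one _ _
  · rw [if_pos (by omega), if_neg (by omega)]
    have hmin : min 11 (n + 1) = 11 := by omega
    rw [hmin, PySem.Set.ofList_eq_self_of_nodup _ (PySem.List.nodup_pyRange_one _ _)]
    have hq : 1 ≤ PySem.Int.floordiv n 10 :=
      (PySem.Int.le_floordiv_iff_mul_le (by omega)).mpr (by omega)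
    set m := PySem.Int.floordiv n 10 * 10 with hm
    have hm10 : 10 ≤ m := by rw [hm]; omega
    have hmdvd : (10:Int) ∣ m := ⟨PySem.Int.floordiv n 10, by rw [hm]; ring⟩
    have hnew : ∀ x ∈ PySem.List.pyRange m 10 (-10), x ∉ PySem.List.pyRange 1 11 1 := by
      intro x hx hxmem
      have h1 := (PySem.List.mem_pyRange_iff_of_neg (by omega) x).mp hx
      have h2 := PySem.List.mem_pyRange_one.mp hxmem
      omega
    have h10 : (10:Int) ∈ PySem.List.pyRange 1 11 1 := by
      rw [PySem.List.mem_pyRange_one]; omega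
    rw [pvAddTens_eq m _ hnew h10]
    have hsplit : PySem.List.pyRange m 0 (-10) = PySem.List.pyRange m 10 (-10) ++ [10] := by
      refine pvTens_split (PySem.Int.floordiv n 10 - 1).toNat m ?_
      rw [hm]; omega
    apply PySem.List.sorted_rev_eq_of_perm_of_pairwise_gt
    · rw [hsplit,
        show PySem.List.pyRange 9 0 (-1) = (PySem.List.pyRange 1 10 1).reverse by
          simpa using PySem.List.pyRange_neg_one_eq_reverse 9 0,
        show PySem.List.pyRange 1 11 1 = PySem.List.pyRange 1 10 1 ++ [10] by
          simpa using PySem.List.pyRange_one_succ_right (a := 1) (b := 10) (by omega)]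
      refine List.Perm.trans (List.Perm.append_left _ (List.reverse_perm _)) ?_
      refine List.Perm.trans List.perm_append_comm ?_
      refine List.Perm.trans (List.Perm.append_left _ List.perm_append_comm) ?_
      rw [List.append_assoc]
    · rw [List.pairwise_append]
      refine ⟨pvTens_pairwise m 0, pvOnes_pairwise, ?_⟩
      intro x hx y hy
      have h1 := (PySem.List.mem_pyRange_iff_of_neg (show (-10:Int) < 0 by omega) x).mp hx
      have h2 := PySem.List.mem_pyRange_neg_one.mp hy
      obtain ⟨q, hqq⟩ := hmdvd
      obtain ⟨r, hrr⟩ := h1.2.2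
      omega
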